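-- pv_equiv track=rewrite | github.com/mmvergara/mmv-dsa | hr_gradingstudent.py | gradingStudents
-- ===== SOURCE A (Python) =====
-- def gradingStudents(grades):
--     for i in range(len(grades)):
--         if grades[i] < 38:
--             continue
--         diff = abs((grades[i]%10)-10)
--         if diff > 5:
--             diff-=5
--
--         if diff < 3:
--             while grades[i]%10 != 5 and grades[i]%10 != 0:
--                 grades[i]+=1
--
--     return grades
-- ===== SOURCE B (Python) =====
-- def gradingStudents(grades):
--     # Same in-place pass; rounding decided and applied in closed form via grade % 5.
--     for i, g in enumerate(grades):
--         if g >= 38 and g % 5 >= 3: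
--             grades[i] = g + 5 - g % 5
--     return grades
-- ===== Notes on version B (the rewrite author's own statement) =====
-- stated objective: simpler
-- what changed: Replaces the abs-distance test plus an incrementing while loop with a direct grade % 5 >= 3 test and a closed-form round-up grade + 5 - grade % 5, in the same single in-place pass (no per-element inner loop or abs computation).
import Mathlib
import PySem

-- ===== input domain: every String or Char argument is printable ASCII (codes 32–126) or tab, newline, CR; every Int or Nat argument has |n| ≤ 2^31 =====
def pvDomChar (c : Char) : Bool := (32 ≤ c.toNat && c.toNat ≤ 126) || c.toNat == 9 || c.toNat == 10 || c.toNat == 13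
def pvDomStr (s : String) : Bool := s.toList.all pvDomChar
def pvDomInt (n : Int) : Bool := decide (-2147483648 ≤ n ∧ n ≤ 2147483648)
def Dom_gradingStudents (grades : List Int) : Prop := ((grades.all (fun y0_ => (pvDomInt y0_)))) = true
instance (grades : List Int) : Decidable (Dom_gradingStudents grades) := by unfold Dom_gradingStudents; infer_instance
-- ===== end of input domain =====

-- B replaces A's abs-distance test and incrementing while loop with a closed-form
-- grade%5 round-up in the same single pass (objective: simpler). Python A and B both
-- mutate the argument list in place; the equivalence proved here is about the return value.


-- ===== PORT A =====
-- the while loop: increment until grades[i]%10 is 5 or 0; fuel 10 only guards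
-- totality (inside A the loop is only entered when at most 2 increments are needed,
-- and for any start the loop body can fire at most 4 times before %10 hits 5 or 0)
def pvBumpA : Nat → Int → Int
  | 0, g => g
  | n+1, g =>
    if PySem.Int.mod g 10 ≠ 5 ∧ PySem.Int.mod g 10 ≠ 0 then pvBumpA n (g + 1) else g

-- the body of A's for loop for one index i (it only reads/writes grades[i])
def pvStepA (g : Int) : Int :=
  if g < 38 then g
  else
    let diff := |PySem.Int.mod g 10 - 10|
    let diff := if diff > 5 then diff - 5 else diff
    if diff < 3 then pvBumpA 10 g else g

def gradingStudents (grades : List Int) : List Int :=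
  grades.map pvStepA

-- ===== PORT B =====
def pvStepB (g : Int) : Int :=
  if g ≥ 38 ∧ PySem.Int.mod g 5 ≥ 3 then g + 5 - PySem.Int.mod g 5 else g

def gradingStudents_alt (grades : List Int) : List Int :=
  grades.map pvStepB

-- ===== PRECONDITION & SPEC =====
def Spec_gradingStudents (grades : List Int) (out : List Int) : Prop := out = gradingStudents_alt grades
instance (grades : List Int) (out : List Int) : Decidable (Spec_gradingStudents grades out) := by unfold Spec_gradingStudents; infer_instance

-- ===== CLAIM (what is proved, stated in full; the proofs are below) =====
def Claim_equal_gradingStudents : Prop := ∀ (grades : List Int), Dom_gradingStudents grades → Spec_gradingStudents grades (gradingStudents grades)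

-- ===== LEMMAS AND PROOFS =====
theorem pvMod_eq_emod (a : Int) (b : Int) (hb : 0 ≤ b) : PySem.Int.mod a b = a % b := by
  simp [PySem.Int.mod, Int.fmod_eq_emod, hb]

theorem pvBumpA_done (n : Nat) (g : Int) (h : g % 10 = 5 ∨ g % 10 = 0) : pvBumpA n g = g := by
  cases n with
  | zero => rfl
  | succ n =>
    have : ¬(PySem.Int.mod g 10 ≠ 5 ∧ PySem.Int.mod g 10 ≠ 0) := by
      rw [pvMod_eq_emod g 10 (by norm_num)]; omega
    simp only [pvBumpA, if_neg this]

theorem pvBumpA_step (n : Nat) (g : Int) (h5 : g % 10 ≠ 5) (h0 : g % 10 ≠ 0) :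
    pvBumpA (n + 1) g = pvBumpA n (g + 1) := by
  have : (PySem.Int.mod g 10 ≠ 5 ∧ PySem.Int.mod g 10 ≠ 0) := by
    rw [pvMod_eq_emod g 10 (by norm_num)]; exact ⟨h5, h0⟩
  simp only [pvBumpA, if_pos this]

theorem pvStep_eq (g : Int) : pvStepA g = pvStepB g := by
  unfold pvStepA pvStepB
  rw [pvMod_eq_emod g 10 (by norm_num), pvMod_eq_emod g 5 (by norm_num)]
  by_cases h38 : g < 38
  · simp [h38, show ¬(g ≥ 38 ∧ g % 5 ≥ 3) from fun ⟨h, _⟩ => absurd h38 (not_lt.mpr h)]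
  · -- g ≥ 38
    have h5 : g % 5 = g % 10 % 5 := (Int.emod_emod_of_dvd g (by norm_num)).symm
    simp only [if_neg h38]
    have h0 : 0 ≤ g % 10 := Int.emod_nonneg g (by norm_num)
    have hlt : g % 10 < 10 := Int.emod_lt_of_pos g (by norm_num)
    set r := g % 10 with hr
    interval_cases r
    -- r = 0,1,2,5,6,7: no rounding (LHS condition false, RHS condition false)
    case _ => norm_num; omega
    case _ => norm_num; omega
    case _ => norm_num; omega
    -- r = 3: two increments; g+5-g%5 = g+2
    case _ =>
      rw [pvBumpA_step 9 g (by omega) (by omega),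
          pvBumpA_step 8 (g + 1) (by omega) (by omega),
          pvBumpA_done 8 (g + 1 + 1) (by omega)]
      norm_num
      split_ifs <;> omega
    -- r = 4: one increment; g+5-g%5 = g+1
    case _ =>
      rw [pvBumpA_step 9 g (by omega) (by omega),
          pvBumpA_done 9 (g + 1) (by omega)]
      norm_num
      split_ifs <;> omega
    case _ => norm_num; omega
    case _ => norm_num; omega
    case _ => norm_num; omega
    -- r = 8: two increments; g+5-g%5 = g+2
    case _ =>
      rw [pvBumpA_step 9 g (by omega) (by omega),
          pvBumpA_step 8 (g + 1) (by omega) (by omega),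
          pvBumpA_done 8 (g + 1 + 1) (by omega)]
      norm_num
      split_ifs <;> omega
    -- r = 9: one increment; g+5-g%5 = g+1
    case _ =>
      rw [pvBumpA_step 9 g (by omega) (by omega),
          pvBumpA_done 9 (g + 1) (by omega)]
      norm_num
      split_ifs <;> omega

-- ===== VERDICT (by name: the statement is the Claim_ definition above) =====
theorem gradingStudents_spec : Claim_equal_gradingStudents := by
  intro grades _
  unfold Spec_gradingStudents gradingStudents gradingStudents_alt
  exact List.map_congr_left fun g _ => pvStep_eq g
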